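-- pv_equiv track=rewrite | github.com/CharleneJiang6/logic-games-in-python | tp2/tp2.py | trois_coloration
-- ===== SOURCE A (Python) =====
-- from itertools import combinations
--
-- def trois_coloration(sommets: list[str], arcs: list[tuple[str, str]], couleurs: list[str]) -> tuple[str, dict]:
--     """genere un texte en format dimacs"""
--
--     # 1/ generer tous les variables à utiliser dans le dimacs
--     i = 1
--     sommet_couleur: dict[str, int] = {}
--     for s in sommets:
--         for c in couleurs:
--             sommet_couleur[s + c] = i  # eg: S1R : 1, S1V : 2 ...
--             i += 1
--
--     # 2/ ecrire la base des clauses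
--     # indices = [0, 3, 6]  # chaque SiX occupe 3 places. eg: les 3 premiers sont S1X. [S1X, S2X, S3X]
--     # variables = list(sommet_couleur.keys())
--     # clauses: list[list[str]] = []  # eg: ['S1R', 'S1V', 'S1B'] est une clause
--     # for i in indices:
--     #     clauses.append([variables[i], variables[i + 1], variables[i + 2]])  # clause "au moins une"
--     #
--     #     clauses.append(['-' + variables[i], '-' + variables[i + 1]])  # clauses de type : not S1R or not S1V
--     #     clauses.append(['-' + variables[i], '-' + variables[i + 2]])
--     #     clauses.append(['-' + variables[i + 1], '-' + variables[i + 2]])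
--     #
--     # for i in range(3):  # pour les 3 couleurs : un pas = une couleur differente
--     #     clauses.append(['-' + variables[indices[0] + i], '-' + variables[indices[1] + i]])
--     #     clauses.append(['-' + variables[indices[0] + i], '-' + variables[indices[2] + i]])
--     #     clauses.append(['-' + variables[indices[1] + i], '-' + variables[indices[2] + i]])
--
--     clauses: list[list[str]] = []  # eg: ['S1R', 'S1V', 'S1B'] est une clause
--
--     # CORRECTION:
--     for s in sommets:  # au moins 1
--         clause = [f"{s}{c}" for c in couleurs]
--         clauses.append(clause)
--
--     for s in sommets:  # au plus 1
--         for c1, c2 in combinations(couleurs, 2):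
--             clauses.append([f"-{s}{c1}", f"-{s}{c2}"])
--
--     for s1, s2 in arcs:
--         for c in couleurs:
--             clauses.append([f"-{s1}{c}", f"-{s2}{c}"])
--
--     prompt = f"c exercice COLORER\np cnf {len(sommet_couleur)} {len(clauses)}\n"
--     for clause in clauses:
--         for l in clause:
--             if l[0] == '-':  # si de la forme -S1R
--                 prompt += '-' + str((sommet_couleur[l[1:]]))
--             else:
--                 prompt += str(sommet_couleur[l])
--             prompt += " "
--         prompt += "0\n"
--
--     return prompt, sommet_couleur
-- ===== SOURCE B (Python) =====
-- def trois_coloration(sommets: list[str], arcs: list[tuple[str, str]], couleurs: list[str]) -> tuple[str, dict]: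
--     """genere le dimacs en un seul passage: les lignes sont emises directement en texte,
--     le nombre de clauses est calcule d'avance, sans liste de clauses ni re-parsing."""
--     sommet_couleur: dict[str, int] = {}
--     i = 1
--     for s in sommets:
--         for c in couleurs:
--             sommet_couleur[s + c] = i
--             i += 1
--
--     # paires ordonnees de couleurs via une liste de travail (remplace itertools.combinations)
--     paires: list[tuple[str, str]] = []
--     reste = list(couleurs)
--     while reste:
--         c1 = reste.pop(0)
--         for c2 in reste:
--             paires.append((c1, c2))
--
--     nb_clauses = len(sommets) * (1 + len(paires)) + len(arcs) * len(couleurs)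
--     lignes = ["c exercice COLORER", f"p cnf {len(sommet_couleur)} {nb_clauses}"]
--     for s in sommets:
--         lignes.append(" ".join([str(sommet_couleur[s + c]) for c in couleurs] + ["0"]))
--     for s in sommets:
--         for c1, c2 in paires:
--             lignes.append(f"-{sommet_couleur[s + c1]} -{sommet_couleur[s + c2]} 0")
--     for s1, s2 in arcs:
--         for c in couleurs:
--             lignes.append(f"-{sommet_couleur[s1 + c]} -{sommet_couleur[s2 + c]} 0")
--     return "\n".join(lignes) + "\n", sommet_couleur
-- ===== Notes on version B (the rewrite author's own statement) =====
-- stated objective: alternative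
-- what changed: B is single-stage: it never builds A's intermediate list of string-label clauses nor runs A's render pass that re-parses each label via l[0]=='-' and a second dict lookup; instead it precomputes the colour pairs with a worklist (replacing itertools.combinations), computes the clause count arithmetically up front, and emits each DIMACS line directly as text joined at the end.
import Mathlib
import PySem

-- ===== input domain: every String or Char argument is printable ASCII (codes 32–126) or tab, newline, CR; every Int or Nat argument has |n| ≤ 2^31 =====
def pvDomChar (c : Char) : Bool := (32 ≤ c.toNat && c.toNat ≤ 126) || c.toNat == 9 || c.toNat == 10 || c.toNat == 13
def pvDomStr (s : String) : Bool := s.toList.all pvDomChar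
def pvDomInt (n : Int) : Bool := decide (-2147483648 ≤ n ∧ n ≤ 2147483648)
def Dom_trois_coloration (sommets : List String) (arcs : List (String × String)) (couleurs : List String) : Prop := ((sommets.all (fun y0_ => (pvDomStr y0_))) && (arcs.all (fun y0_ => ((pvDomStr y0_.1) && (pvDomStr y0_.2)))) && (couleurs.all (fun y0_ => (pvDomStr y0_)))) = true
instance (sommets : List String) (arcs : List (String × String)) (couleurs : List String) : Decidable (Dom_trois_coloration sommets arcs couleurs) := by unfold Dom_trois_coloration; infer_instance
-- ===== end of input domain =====

-- B is single-stage: no intermediate list of string-label clauses and no render pass re-parsing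
-- labels via l[0] == '-'; colour pairs come from a worklist (no itertools), the clause count is
-- computed arithmetically, each DIMACS line is emitted directly as text and joined at the end.
-- Equivalence is about the return value (neither Python mutates its arguments).

-- The numbering loop (step 1 of the Python), identical in A and in B:
-- sommet_couleur[s + c] = i; i += 1 over sommets × couleurs.
def pvMkSCInner (s : String) (couleurs : List String) (st : PySem.Dict String Int × Int) :
    PySem.Dict String Int × Int :=
  couleurs.foldl (fun st c => (st.1.insert (s ++ c) st.2, st.2 + 1)) st

def pvMkSC (sommets couleurs : List String) : PySem.Dict String Int × Int :=
  sommets.foldl (fun st s => pvMkSCInner s couleurs st) (PySem.Dict.empty, 1)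

-- ===== PORT A =====
-- the three clause-building loops, as string labels (A)
def pvClausesA (sommets : List String) (arcs : List (String × String)) (couleurs : List String) :
    List (List String) :=
  (sommets.map fun s => couleurs.map fun c => s ++ c)
    ++ (sommets.flatMap fun s =>
        (PySem.List.combinations couleurs 2).map fun p =>
          match p with
          | [c1, c2] => ["-" ++ s ++ c1, "-" ++ s ++ c2]
          | _ => [])
    ++ (arcs.flatMap fun a => couleurs.map fun c => ["-" ++ a.1 ++ c, "-" ++ a.2 ++ c])

-- one literal of A's render pass: if l[0] == '-' then '-' + str(d[l[1:]]) else str(d[l])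
-- (the lookups are d.getD _ 0; Pre_ guarantees the key is present, where Python would raise KeyError)
def pvRenderLitA (d : PySem.Dict String Int) (l : String) : String :=
  if PySem.Str.pyGet? l 0 = some '-' then
    "-" ++ PySem.Int.toStr (d.getD (PySem.Str.slice l (some 1) none) 0)
  else
    PySem.Int.toStr (d.getD l 0)

def trois_coloration (sommets : List String) (arcs : List (String × String)) (couleurs : List String) : String × (List (String × Int)) :=
  let d := (pvMkSC sommets couleurs).1
  let clauses := pvClausesA sommets arcs couleurs
  let prompt := "c exercice COLORER\np cnf " ++ PySem.Int.toStr (PySem.Dict.size d : Int)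
      ++ " " ++ PySem.Int.toStr (PySem.List.len clauses) ++ "\n"
  let prompt := clauses.foldl
      (fun acc clause =>
        (clause.foldl (fun acc l => acc ++ (pvRenderLitA d l ++ " ")) acc) ++ "0\n")
      prompt
  (prompt, d.items)

-- ===== PORT B =====
-- the worklist loop building the ordered colour pairs:
-- while reste: c1 = reste.pop(0); for c2 in reste: paires.append((c1, c2))
def pvPaires : List String → List (String × String)
  | [] => []
  | c1 :: reste => (reste.map fun c2 => (c1, c2)) ++ pvPaires reste

-- the three line-emitting loops of B (appended after the two header lines)
def pvLignesB (d : PySem.Dict String Int) (sommets : List String)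
    (arcs : List (String × String)) (couleurs : List String) : List String :=
  (sommets.map fun s =>
      PySem.Str.join " " ((couleurs.map fun c => PySem.Int.toStr (d.getD (s ++ c) 0)) ++ ["0"]))
    ++ (sommets.flatMap fun s => (pvPaires couleurs).map fun p =>
        "-" ++ PySem.Int.toStr (d.getD (s ++ p.1) 0)
          ++ " -" ++ PySem.Int.toStr (d.getD (s ++ p.2) 0) ++ " 0")
    ++ (arcs.flatMap fun a => couleurs.map fun c =>
        "-" ++ PySem.Int.toStr (d.getD (a.1 ++ c) 0)
          ++ " -" ++ PySem.Int.toStr (d.getD (a.2 ++ c) 0) ++ " 0")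

def trois_coloration_alt (sommets : List String) (arcs : List (String × String)) (couleurs : List String) : String × (List (String × Int)) :=
  let d := (pvMkSC sommets couleurs).1
  let paires := pvPaires couleurs
  let nb : Int := PySem.List.len sommets * (1 + PySem.List.len paires)
      + PySem.List.len arcs * PySem.List.len couleurs
  let lignes : List String :=
    ("c exercice COLORER"
        :: ("p cnf " ++ PySem.Int.toStr (PySem.Dict.size d : Int) ++ " " ++ PySem.Int.toStr nb)
        :: pvLignesB d sommets arcs couleurs)
  (PySem.Str.join "\n" lignes ++ "\n", d.items)

-- ===== PRECONDITION & SPEC =====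
-- Pre_ excludes (a) inputs where some sommet+couleur label is empty or begins with '-' — there A's
-- render pass re-parses the label as a negative literal (IndexError on the empty label; on a '-'
-- label A returns an accidental sign/number from stripping the first character, an artefact of its
-- string re-parsing that B, working on integers, has no reason to reproduce) — and (b) arcs whose
-- endpoint+couleur key was never numbered, where both A and B raise KeyError.
def Pre_trois_coloration (sommets : List String) (arcs : List (String × String)) (couleurs : List String) : Prop :=
  (∀ s ∈ sommets, ∀ c ∈ couleurs, (s ++ c).toList ≠ [] ∧ (s ++ c).toList.head? ≠ some '-')
  ∧ (∀ a ∈ arcs, ∀ c ∈ couleurs,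
      (∃ s ∈ sommets, ∃ c' ∈ couleurs, a.1 ++ c = s ++ c')
      ∧ (∃ s ∈ sommets, ∃ c' ∈ couleurs, a.2 ++ c = s ++ c'))
instance (sommets : List String) (arcs : List (String × String)) (couleurs : List String) : Decidable (Pre_trois_coloration sommets arcs couleurs) := by unfold Pre_trois_coloration; infer_instance

def pvWitness_trois_coloration : List String × (List (String × String)) × List String :=
  (["a", "b"], [("a", "b")], ["R", "G", "B"])

def Spec_trois_coloration (sommets : List String) (arcs : List (String × String)) (couleurs : List String) (out : String × (List (String × Int))) : Prop := out = trois_coloration_alt sommets arcs couleurs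
instance (sommets : List String) (arcs : List (String × String)) (couleurs : List String) (out : String × (List (String × Int))) : Decidable (Spec_trois_coloration sommets arcs couleurs out) := by unfold Spec_trois_coloration; infer_instance

-- ===== CLAIM (what is proved, stated in full; the proofs are below) =====
def Claim_equal_trois_coloration : Prop := ∀ (sommets : List String) (arcs : List (String × String)) (couleurs : List String), Dom_trois_coloration sommets arcs couleurs → Pre_trois_coloration sommets arcs couleurs → Spec_trois_coloration sommets arcs couleurs (trois_coloration sommets arcs couleurs)

-- ===== LEMMAS AND PROOFS =====

-- one rendered line per clause of A
def pvLineA (d : PySem.Dict String Int) (cl : List String) : String :=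
  PySem.Str.join "" (cl.map fun l => pvRenderLitA d l ++ " ") ++ "0\n"

-- join with the empty separator peels off the head
theorem pvJoin_nil_cons (l : List Char) (ls : List (List Char)) :
    PySem.Chars.join [] (l :: ls) = l ++ PySem.Chars.join [] ls := by
  cases ls with
  | nil => simp [PySem.Chars.join_singleton, PySem.Chars.join_nil]
  | cons y r => simp [PySem.Chars.join_cons_cons]

theorem pvStrJoin_nil_cons (l : String) (ls : List String) :
    PySem.Str.join "" (l :: ls) = l ++ PySem.Str.join "" ls := by
  apply String.ext
  simp [PySem.Str.join, pvJoin_nil_cons]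

-- a foldl that appends g x for each x is acc ++ "".join(map g xs)
theorem pvFoldl_append_join {α : Type} (g : α → String) (xs : List α) (acc : String) :
    xs.foldl (fun a x => a ++ g x) acc = acc ++ PySem.Str.join "" (xs.map g) := by
  induction xs generalizing acc with
  | nil =>
    apply String.ext
    simp [PySem.Str.join, PySem.Chars.join_nil]
  | cons x xs ih =>
    simp only [List.foldl_cons, List.map_cons, ih]
    apply String.ext
    simp [PySem.Str.join, pvJoin_nil_cons]

-- A's whole render loop is the header followed by "".join of the rendered lines
theorem pvRenderA_eq (d : PySem.Dict String Int) (clauses : List (List String)) (acc : String) :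
    clauses.foldl
        (fun acc clause =>
          (clause.foldl (fun acc l => acc ++ (pvRenderLitA d l ++ " ")) acc) ++ "0\n") acc
      = acc ++ PySem.Str.join "" (clauses.map (pvLineA d)) := by
  have h : (fun (acc : String) (clause : List String) =>
        (clause.foldl (fun acc l => acc ++ (pvRenderLitA d l ++ " ")) acc) ++ "0\n")
      = fun acc clause => acc ++ pvLineA d clause := by
    funext acc cl
    rw [pvFoldl_append_join (fun l => pvRenderLitA d l ++ " ") cl acc, String.append_assoc]
    rfl
  rw [h, pvFoldl_append_join (pvLineA d) clauses acc]

-- "\n".join(lines) + "\n" appends "\n" to every line (char level, then strings)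
theorem pvJoinNL_chars (a : List Char) (ls : List (List Char)) :
    PySem.Chars.join ['\n'] (a :: ls) ++ ['\n']
      = PySem.Chars.join [] ((a :: ls).map (· ++ ['\n'])) := by
  induction ls generalizing a with
  | nil => simp [PySem.Chars.join_singleton, pvJoin_nil_cons, PySem.Chars.join_nil]
  | cons b r ih =>
    simp only [List.map_cons] at *
    rw [PySem.Chars.join_cons_cons, pvJoin_nil_cons, List.append_assoc, List.append_assoc,
      ← ih b]
    simp

theorem pvJoinNL (a : String) (ls : List String) :
    PySem.Str.join "\n" (a :: ls) ++ "\n" = PySem.Str.join "" ((a :: ls).map (· ++ "\n")) := by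
  apply String.ext
  have hmap : ∀ ms : List String, (ms.map (fun x => x ++ "\n")).map String.toList
      = (ms.map String.toList).map (· ++ ['\n']) := by
    intro ms
    simp [List.map_map, Function.comp]
  simp only [PySem.Str.join, String.toList_append, String.toList_ofList, List.map_cons]
  have h := pvJoinNL_chars a.toList (ls.map String.toList)
  simp only [List.map_cons] at h
  rw [show ("\n" : String).toList = ['\n'] by decide, h, ← hmap ls]
  simp

-- " ".join(ys + ["0"])  =  "".join(y + " " for y in ys) + "0"  (char level, then strings)
theorem pvAtLeast_chars (ys : List (List Char)) :
    PySem.Chars.join [' '] (ys ++ [['0']])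
      = PySem.Chars.join [] (ys.map (· ++ [' '])) ++ ['0'] := by
  induction ys with
  | nil => simp [PySem.Chars.join_singleton, PySem.Chars.join_nil]
  | cons y ys ih =>
    cases ys with
    | nil =>
      simp [PySem.Chars.join_cons_cons, PySem.Chars.join_singleton, pvJoin_nil_cons,
        PySem.Chars.join_nil]
    | cons z zs =>
      simp only [List.cons_append] at ih ⊢
      rw [PySem.Chars.join_cons_cons, ih]
      simp [pvJoin_nil_cons, List.append_assoc]

theorem pvAtLeastLine (ys : List String) :
    PySem.Str.join " " (ys ++ ["0"]) ++ "\n"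
      = PySem.Str.join "" (ys.map (· ++ " ")) ++ "0\n" := by
  apply String.ext
  have hmap : (ys.map (fun x => x ++ " ")).map String.toList
      = (ys.map String.toList).map (· ++ [' ']) := by
    simp [List.map_map, Function.comp]
  simp only [PySem.Str.join, String.toList_append, String.toList_ofList, List.map_append,
    List.map_cons, List.map_nil]
  rw [show ("0" : String).toList = ['0'] by decide, show (" " : String).toList = [' '] by decide,
    pvAtLeast_chars, hmap]
  simp

-- the flat binary line of B, against A's two-literal rendered clause shape
theorem pvBinLine (p q : String) :
    ("-" ++ p ++ " -" ++ q ++ " 0") ++ "\n"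
      = PySem.Str.join "" [("-" ++ p) ++ " ", ("-" ++ q) ++ " "] ++ "0\n" := by
  apply String.ext
  simp [PySem.Str.join, PySem.Chars.join_cons_cons, PySem.Chars.join_singleton]

-- the worklist pairs are exactly itertools.combinations(couleurs, 2)
theorem pvComb2 (xs : List String) :
    PySem.List.combinations xs 2 = (pvPaires xs).map (fun p => [p.1, p.2]) := by
  induction xs with
  | nil => simp [PySem.List.combinations_nil_succ, pvPaires]
  | cons x xs ih =>
    rw [show (2 : Nat) = 1 + 1 from rfl] at *
    rw [PySem.List.combinations_cons_succ, PySem.List.combinations_one, ih]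
    simp [pvPaires, List.map_map, Function.comp]

-- every key already present stays present through the numbering loop
theorem pvMkSCInner_mono (s : String) (couleurs : List String) (st : PySem.Dict String Int × Int)
    (k : String) (h : (st.1.get? k).isSome) : (((pvMkSCInner s couleurs st).1).get? k).isSome := by
  induction couleurs generalizing st with
  | nil => exact h
  | cons c cs ih =>
    refine ih _ ?_
    simp only [PySem.Dict.get?_insert]
    split <;> simp_all

theorem pvMkSCInner_contains (s : String) (couleurs : List String)
    (st : PySem.Dict String Int × Int) (c : String) (hc : c ∈ couleurs) :
    (((pvMkSCInner s couleurs st).1).get? (s ++ c)).isSome := by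
  induction couleurs generalizing st with
  | nil => cases hc
  | cons c' cs ih =>
    rcases List.mem_cons.mp hc with h | h
    · subst h
      exact pvMkSCInner_mono s cs _ _ (by simp [PySem.Dict.get?_insert_self])
    · exact ih _ h

theorem pvFold_mono (ss couleurs : List String) (st : PySem.Dict String Int × Int)
    (k : String) (h : (st.1.get? k).isSome) :
    (((ss.foldl (fun st s => pvMkSCInner s couleurs st) st).1).get? k).isSome := by
  induction ss generalizing st with
  | nil => exact h
  | cons a l ih =>
    simp only [List.foldl_cons]
    exact ih _ (pvMkSCInner_mono _ _ _ _ h)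

-- every sommet+couleur key is numbered
theorem pvMkSC_contains (sommets couleurs : List String) (s c : String)
    (hs : s ∈ sommets) (hc : c ∈ couleurs) :
    (((pvMkSC sommets couleurs).1).get? (s ++ c)).isSome := by
  unfold pvMkSC
  generalize (PySem.Dict.empty, (1:Int)) = st
  induction sommets generalizing st with
  | nil => cases hs
  | cons s' ss ih =>
    rcases List.mem_cons.mp hs with h | h
    · subst h
      simp only [List.foldl_cons]
      exact pvFold_mono ss couleurs _ _ (pvMkSCInner_contains s couleurs st c hc)
    · simp only [List.foldl_cons]
      exact ih h _

-- a label that is nonempty and does not start with '-' is read positively by A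
theorem pvRenderLitA_pos (d : PySem.Dict String Int) (k : String)
    (_hk : k.toList ≠ []) (hh : k.toList.head? ≠ some '-') :
    pvRenderLitA d k = PySem.Int.toStr (d.getD k 0) := by
  unfold pvRenderLitA
  rw [if_neg]
  intro hcon
  rw [show ((0:Int)) = ((0:Nat):Int) by norm_num, PySem.Str.pyGet?_natCast] at hcon
  cases h : k.toList with
  | nil => simp [h] at hcon
  | cons a l => rw [h] at hcon; simp at hcon; simp [h, hcon] at hh

-- a '-'-prefixed label over a numbered key is read as the negated number by A
theorem pvRenderLitA_neg (d : PySem.Dict String Int) (k : String)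
    (hpresent : (d.get? k).isSome) :
    pvRenderLitA d ("-" ++ k) = "-" ++ PySem.Int.toStr (d.getD k 0) := by
  obtain ⟨v, hv⟩ := Option.isSome_iff_exists.mp hpresent
  have hgd : d.getD k 0 = v := PySem.Dict.getD_of_get?_eq_some d 0 hv
  have h1 : ("-" ++ k).toList = '-' :: k.toList := by simp
  unfold pvRenderLitA
  rw [if_pos]
  · have hs : PySem.Str.slice ("-" ++ k) (some 1) none = k := by
      apply String.ext
      rw [PySem.Str.toList_slice]
      simp only [h1, PySem.Chars.slice_eq_listSlice]
      rw [show (1:Int) = ((1:Nat):Int) from rfl, PySem.List.slice_from_natCast]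
      simp
    rw [hs]
  · rw [show ((0:Int)) = ((0:Nat):Int) by norm_num, PySem.Str.pyGet?_natCast]
    simp [h1]

-- both components of a worklist pair come from the list
theorem pvPaires_mem (xs : List String) (p : String × String) (h : p ∈ pvPaires xs) :
    p.1 ∈ xs ∧ p.2 ∈ xs := by
  induction xs with
  | nil => simp [pvPaires] at h
  | cons c cs ih =>
    simp only [pvPaires, List.mem_append, List.mem_map] at h
    rcases h with ⟨c2, hc2, hp⟩ | h
    · refine ⟨?_, ?_⟩
      · simp [← congrArg Prod.fst hp]
      · have := congrArg Prod.snd hp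
        simp at this
        simp [← this, hc2]
    · obtain ⟨h1, h2⟩ := ih h
      exact ⟨List.mem_cons_of_mem _ h1, List.mem_cons_of_mem _ h2⟩

-- clause for clause, A's rendered lines are B's lines with "\n" appended
theorem pvLines_eq (sommets : List String) (arcs : List (String × String))
    (couleurs : List String) (hpre : Pre_trois_coloration sommets arcs couleurs) :
    (pvClausesA sommets arcs couleurs).map (pvLineA ((pvMkSC sommets couleurs).1))
      = (pvLignesB ((pvMkSC sommets couleurs).1) sommets arcs couleurs).map (· ++ "\n") := by
  set d := (pvMkSC sommets couleurs).1 with hd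
  have hlitneg : ∀ x : String, (∃ s ∈ sommets, ∃ c ∈ couleurs, x = s ++ c) →
      pvRenderLitA d ("-" ++ x) = "-" ++ PySem.Int.toStr (d.getD x 0) := by
    rintro x ⟨s, hs, c, hc, rfl⟩
    exact pvRenderLitA_neg d _ (pvMkSC_contains sommets couleurs s c hs hc)
  have hpair : ∀ s c1 c2 : String, s ∈ sommets → c1 ∈ couleurs → c2 ∈ couleurs →
      pvLineA d ["-" ++ s ++ c1, "-" ++ s ++ c2]
        = ("-" ++ PySem.Int.toStr (d.getD (s ++ c1) 0)
            ++ " -" ++ PySem.Int.toStr (d.getD (s ++ c2) 0) ++ " 0") ++ "\n" := by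
    intro s c1 c2 hs h1 h2
    unfold pvLineA
    rw [String.append_assoc (s₁ := "-") (s₂ := s) (s₃ := c1),
      String.append_assoc (s₁ := "-") (s₂ := s) (s₃ := c2)]
    simp only [List.map_cons, List.map_nil]
    rw [hlitneg (s ++ c1) ⟨s, hs, c1, h1, rfl⟩, hlitneg (s ++ c2) ⟨s, hs, c2, h2, rfl⟩,
      pvBinLine]
  unfold pvClausesA pvLignesB
  simp only [List.map_append]
  congr 1
  · congr 1
    · -- at-least-one clauses
      rw [List.map_map, List.map_map]
      apply List.map_congr_left
      intro s hs
      simp only [Function.comp]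
      rw [pvAtLeastLine]
      unfold pvLineA
      rw [List.map_map, List.map_map]
      congr 2
      apply List.map_congr_left
      intro c hc
      simp only [Function.comp]
      obtain ⟨hne, hhd⟩ := hpre.1 s hs c hc
      rw [pvRenderLitA_pos d (s ++ c) hne hhd]
    · -- at-most-one clauses
      rw [List.map_flatMap, List.map_flatMap]
      apply List.flatMap_congr
      intro s hs
      rw [pvComb2, List.map_map, List.map_map, List.map_map]
      apply List.map_congr_left
      intro p hp
      obtain ⟨h1, h2⟩ := pvPaires_mem couleurs p hp
      simp only [Function.comp]
      exact hpair s p.1 p.2 hs h1 h2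
  · -- per-arc clauses
    rw [List.map_flatMap, List.map_flatMap]
    apply List.flatMap_congr
    intro a ha
    rw [List.map_map, List.map_map]
    apply List.map_congr_left
    intro c hc
    obtain ⟨h1x, h2x⟩ := hpre.2 a ha c hc
    simp only [Function.comp]
    unfold pvLineA
    rw [String.append_assoc (s₁ := "-") (s₂ := a.1) (s₃ := c),
      String.append_assoc (s₁ := "-") (s₂ := a.2) (s₃ := c)]
    simp only [List.map_cons, List.map_nil]
    rw [hlitneg (a.1 ++ c) h1x, hlitneg (a.2 ++ c) h2x, pvBinLine]

-- A's clause count equals B's arithmetic count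
theorem pvCount_eq (sommets : List String) (arcs : List (String × String))
    (couleurs : List String) :
    PySem.List.len (pvClausesA sommets arcs couleurs)
      = PySem.List.len sommets * (1 + PySem.List.len (pvPaires couleurs))
        + PySem.List.len arcs * PySem.List.len couleurs := by
  have h1 : ∀ {α : Type} (n : Nat) (l : List α), (l.map (fun _ => n)).sum = l.length * n := by
    intro α n l
    induction l with
    | nil => simp
    | cons x xs ih => simp [ih]; ring
  have key : (pvClausesA sommets arcs couleurs).length
      = sommets.length * (1 + (pvPaires couleurs).length) + arcs.length * couleurs.length := by
    unfold pvClausesA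
    simp only [List.length_append, List.length_flatMap, List.length_map, pvComb2,
      List.map_map, Function.comp]
    rw [h1, h1]
    ring
  simp only [PySem.List.len_eq, key]
  push_cast
  ring

-- ===== VERDICT (by name: the statement is the Claim_ definition above) =====
theorem trois_coloration_spec : Claim_equal_trois_coloration := by
  intro sommets arcs couleurs _hdom hpre
  unfold Spec_trois_coloration trois_coloration trois_coloration_alt
  dsimp only
  refine congrArg₂ Prod.mk ?_ rfl
  rw [pvRenderA_eq, pvCount_eq, pvJoinNL]
  simp only [List.map_cons]
  rw [pvStrJoin_nil_cons, pvStrJoin_nil_cons,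
    ← pvLines_eq sommets arcs couleurs hpre]
  have hlit : ∀ X : String,
      ("c exercice COLORER\np cnf " ++ X) = "c exercice COLORER\n" ++ ("p cnf " ++ X) := by
    intro X
    apply String.ext
    simp only [String.toList_append]
    rw [show ("c exercice COLORER\np cnf " : String).toList
        = ("c exercice COLORER\n" : String).toList ++ ("p cnf " : String).toList by decide,
      List.append_assoc]
  simp only [String.append_assoc]
  exact hlit _
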